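-- pv_equiv track=rewrite | github.com/BlueSkyXN/SuperWeb2PDF | superweb2pdf/core/splitter.py | is_blank_row
-- ===== SOURCE A (Python) =====
-- from collections.abc import Sequence
--
-- def _normalise_pixel(pixel: tuple[int, ...] | int) -> tuple[int, ...]:
--     """Return *pixel* as a tuple so grayscale and RGB rows share one code path."""
--     return (pixel,) if isinstance(pixel, int) else pixel
--
-- def is_blank_row(
--     row_pixels: Sequence[tuple[int, ...] | int],
--     tolerance: int = 10,
-- ) -> bool:
--     """Decide whether a row of pixel values is effectively a single solid colour.
--
--     A row is considered *blank* when each sampled channel remains within a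
--     ``tolerance``-sized range across the row.
--
--     Parameters
--     ----------
--     row_pixels:
--         Sequence of pixel values.  Each element is either an ``(R, G, B)`` /
--         ``(R, G, B, A)`` tuple **or** a single int for greyscale images.
--     tolerance:
--         Maximum per-channel range allowed across sampled pixels.
--
--     Returns
--     -------
--     bool
--         ``True`` if the row is blank.
--     """
--     if tolerance < 0:
--         raise ValueError(f"tolerance must be non-negative, got {tolerance}")
--     if not row_pixels:
--         return True
--
--     first = _normalise_pixel(row_pixels[0])
--     channel_count = len(first)
--     if channel_count == 0:
--         return True
--
--     min_values = list(first)
--     max_values = list(first)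
--
--     # Avoid Counter(row) and a second full pass.  For a blank row, every sampled
--     # channel must stay within a tolerance-sized range.  Exit as soon as a row is
--     # known to contain meaningful content.
--     for pixel in row_pixels[1:]:
--         px = _normalise_pixel(pixel)
--         if len(px) != channel_count:
--             return False
--         for idx, value in enumerate(px):
--             if value < min_values[idx]:
--                 min_values[idx] = value
--             elif value > max_values[idx]:
--                 max_values[idx] = value
--             if max_values[idx] - min_values[idx] > tolerance:
--                 return False
--
--     return True
-- ===== SOURCE B (Python) =====
-- def is_blank_row(row_pixels, tolerance=10):
--     if tolerance < 0:
--         raise ValueError(f"tolerance must be non-negative, got {tolerance}")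
--     if not row_pixels:
--         return True
--     pixels = [(p,) if isinstance(p, int) else tuple(p) for p in row_pixels]
--     n = len(pixels[0])
--     if n == 0:
--         return True
--     if any(len(p) != n for p in pixels):
--         return False
--     return all(max(col) - min(col) <= tolerance for col in zip(*pixels))
-- ===== Notes on version B (the rewrite author's own statement) =====
-- stated objective: simpler
-- what changed: Replaces the pixel-major running min/max scan with early exit by a channel-major transpose that checks max(col)-min(col) <= tolerance per channel.
import Mathlib
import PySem

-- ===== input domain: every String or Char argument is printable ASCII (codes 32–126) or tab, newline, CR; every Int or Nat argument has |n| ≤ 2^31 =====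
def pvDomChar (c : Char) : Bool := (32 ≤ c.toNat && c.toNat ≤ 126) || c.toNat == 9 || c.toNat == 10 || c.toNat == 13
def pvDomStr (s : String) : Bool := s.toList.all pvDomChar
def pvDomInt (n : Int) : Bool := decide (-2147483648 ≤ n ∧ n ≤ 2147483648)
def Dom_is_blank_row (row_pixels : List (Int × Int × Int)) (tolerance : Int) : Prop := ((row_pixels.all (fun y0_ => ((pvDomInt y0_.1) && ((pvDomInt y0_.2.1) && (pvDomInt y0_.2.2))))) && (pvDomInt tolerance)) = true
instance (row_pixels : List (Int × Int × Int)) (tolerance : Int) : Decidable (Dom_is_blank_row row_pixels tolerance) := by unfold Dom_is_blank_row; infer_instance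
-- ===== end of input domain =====

-- B replaces A's pixel-major running min/max scan by a channel-major max-min check; objective: simpler.
-- Under the Lean type every pixel is a 3-tuple, so A's per-pixel length check and the grayscale
-- normalisation are vacuous and the inner channel loop is unrolled over the three fixed channels.

-- ===== PORT A =====
-- A's main loop over row_pixels[1:] with running per-channel min/max and early False exits.
def pvLoopA (tol : Int) (mn mx : Int × Int × Int) : List (Int × Int × Int) → Bool
  | [] => true
  | px :: rest =>
    -- channel 0
    let mn0 := if px.1 < mn.1 then px.1 else mn.1
    let mx0 := if px.1 < mn.1 then mx.1 else if px.1 > mx.1 then px.1 else mx.1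
    if mx0 - mn0 > tol then false else
    -- channel 1
    let mn1 := if px.2.1 < mn.2.1 then px.2.1 else mn.2.1
    let mx1 := if px.2.1 < mn.2.1 then mx.2.1 else if px.2.1 > mx.2.1 then px.2.1 else mx.2.1
    if mx1 - mn1 > tol then false else
    -- channel 2
    let mn2 := if px.2.2 < mn.2.2 then px.2.2 else mn.2.2
    let mx2 := if px.2.2 < mn.2.2 then mx.2.2 else if px.2.2 > mx.2.2 then px.2.2 else mx.2.2
    if mx2 - mn2 > tol then false else
    pvLoopA tol (mn0, mn1, mn2) (mx0, mx1, mx2) rest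

def is_blank_row (row_pixels : List (Int × Int × Int)) (tolerance : Int) : Bool :=
  -- tolerance < 0 raises ValueError in Python: excluded by Pre_is_blank_row
  if tolerance < 0 then false
  else
    match row_pixels with
    | [] => true
    | first :: rest => pvLoopA tolerance first first rest

-- ===== PORT B =====
-- B transposes into per-channel columns and checks max(col) - min(col) <= tolerance for each.
def pvColMax (x : Int) (xs : List Int) : Int := xs.foldl max x
def pvColMin (x : Int) (xs : List Int) : Int := xs.foldl min x

def is_blank_row_alt (row_pixels : List (Int × Int × Int)) (tolerance : Int) : Bool :=
  -- tolerance < 0 raises ValueError in Python: excluded by Pre_is_blank_row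
  if tolerance < 0 then false
  else
    match row_pixels with
    | [] => true
    | first :: rest =>
      let c0 := rest.map (·.1)
      let c1 := rest.map (·.2.1)
      let c2 := rest.map (·.2.2)
      decide (pvColMax first.1 c0 - pvColMin first.1 c0 ≤ tolerance ∧
              pvColMax first.2.1 c1 - pvColMin first.2.1 c1 ≤ tolerance ∧
              pvColMax first.2.2 c2 - pvColMin first.2.2 c2 ≤ tolerance)

-- ===== PRECONDITION & SPEC =====
-- Python A raises ValueError when tolerance < 0; those inputs are excluded.
def Pre_is_blank_row (row_pixels : List (Int × Int × Int)) (tolerance : Int) : Prop := 0 ≤ tolerance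
instance (row_pixels : List (Int × Int × Int)) (tolerance : Int) : Decidable (Pre_is_blank_row row_pixels tolerance) := by unfold Pre_is_blank_row; infer_instance
def pvWitness_is_blank_row : (List (Int × Int × Int)) × Int := ([(10, 10, 10), (12, 9, 10)], 5)

def Spec_is_blank_row (row_pixels : List (Int × Int × Int)) (tolerance : Int) (out : Bool) : Prop := out = is_blank_row_alt row_pixels tolerance
instance (row_pixels : List (Int × Int × Int)) (tolerance : Int) (out : Bool) : Decidable (Spec_is_blank_row row_pixels tolerance out) := by unfold Spec_is_blank_row; infer_instance

-- ===== CLAIM (what is proved, stated in full; the proofs are below) =====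
def Claim_equal_is_blank_row : Prop := ∀ (row_pixels : List (Int × Int × Int)) (tolerance : Int), Dom_is_blank_row row_pixels tolerance → Pre_is_blank_row row_pixels tolerance → Spec_is_blank_row row_pixels tolerance (is_blank_row row_pixels tolerance)

-- ===== LEMMAS AND PROOFS =====

theorem pvFoldlMin_le (l : List Int) (x : Int) : l.foldl min x ≤ x := by
  induction l generalizing x with
  | nil => simp
  | cons a t ih => exact le_trans (ih (min x a)) (min_le_left _ _)

-- A's running scan with early exit computes exactly B's per-channel range check,
-- provided the incoming state is ordered and already within tolerance.
theorem pvLoopA_eq (tol : Int) (rest : List (Int × Int × Int)) :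
    ∀ mn mx : Int × Int × Int,
    mn.1 ≤ mx.1 → mn.2.1 ≤ mx.2.1 → mn.2.2 ≤ mx.2.2 →
    mx.1 - mn.1 ≤ tol → mx.2.1 - mn.2.1 ≤ tol → mx.2.2 - mn.2.2 ≤ tol →
    pvLoopA tol mn mx rest =
      decide (pvColMax mx.1 (rest.map (·.1)) - pvColMin mn.1 (rest.map (·.1)) ≤ tol ∧
              pvColMax mx.2.1 (rest.map (·.2.1)) - pvColMin mn.2.1 (rest.map (·.2.1)) ≤ tol ∧
              pvColMax mx.2.2 (rest.map (·.2.2)) - pvColMin mn.2.2 (rest.map (·.2.2)) ≤ tol) := by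
  induction rest with
  | nil =>
    intro mn mx _ _ _ h4 h5 h6
    simp [pvLoopA, pvColMax, pvColMin, h4, h5, h6]
  | cons px t ih =>
    intro mn mx h1 h2 h3 h4 h5 h6
    have upd : ∀ v lo hi : Int, lo ≤ hi →
        ((if v < lo then v else lo) = min lo v ∧
         (if v < lo then hi else if v > hi then v else hi) = max hi v) := by
      intro v lo hi hle
      constructor <;> split_ifs <;> omega
    have u0 := upd px.1 mn.1 mx.1 h1
    have u1 := upd px.2.1 mn.2.1 mx.2.1 h2
    have u2 := upd px.2.2 mn.2.2 mx.2.2 h3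
    show pvLoopA tol mn mx (px :: t) = _
    rw [pvLoopA]
    simp only [u0.1, u0.2, u1.1, u1.2, u2.1, u2.2]
    have range_ge : ∀ (v lo hi : Int) (ys : List Int),
        max hi v - min lo v ≤ pvColMax (max hi v) ys - pvColMin (min lo v) ys := by
      intro v lo hi ys
      have h1 := (PySem.List.le_foldl_max ys (max hi v)).1
      have h2 := pvFoldlMin_le ys (min lo v)
      simp only [pvColMax, pvColMin]
      omega
    have colstep : ∀ (x y v : Int) (s : List Int),
        pvColMax x (v :: s) = pvColMax (max x v) s ∧ pvColMin y (v :: s) = pvColMin (min y v) s := by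
      intro x y v s; exact ⟨rfl, rfl⟩
    split_ifs with g0 g1 g2
    · have := range_ge px.1 mn.1 mx.1 (t.map (·.1))
      simp only [List.map_cons, (colstep mx.1 mn.1 px.1 (t.map (·.1))).1,
        (colstep mx.1 mn.1 px.1 (t.map (·.1))).2]
      symm; simp only [decide_eq_false_iff_not]; intro h; omega
    · have := range_ge px.2.1 mn.2.1 mx.2.1 (t.map (·.2.1))
      simp only [List.map_cons, (colstep mx.2.1 mn.2.1 px.2.1 (t.map (·.2.1))).1,
        (colstep mx.2.1 mn.2.1 px.2.1 (t.map (·.2.1))).2]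
      symm; simp only [decide_eq_false_iff_not]; intro h; omega
    · have := range_ge px.2.2 mn.2.2 mx.2.2 (t.map (·.2.2))
      simp only [List.map_cons, (colstep mx.2.2 mn.2.2 px.2.2 (t.map (·.2.2))).1,
        (colstep mx.2.2 mn.2.2 px.2.2 (t.map (·.2.2))).2]
      symm; simp only [decide_eq_false_iff_not]; intro h; omega
    · rw [ih (min mn.1 px.1, min mn.2.1 px.2.1, min mn.2.2 px.2.2)
            (max mx.1 px.1, max mx.2.1 px.2.1, max mx.2.2 px.2.2)
            (by dsimp only; omega) (by dsimp only; omega) (by dsimp only; omega)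
            (not_lt.mp g0) (not_lt.mp g1) (not_lt.mp g2)]
      simp only [List.map_cons, (colstep mx.1 mn.1 px.1 (t.map (·.1))).1,
        (colstep mx.1 mn.1 px.1 (t.map (·.1))).2,
        (colstep mx.2.1 mn.2.1 px.2.1 (t.map (·.2.1))).1,
        (colstep mx.2.1 mn.2.1 px.2.1 (t.map (·.2.1))).2,
        (colstep mx.2.2 mn.2.2 px.2.2 (t.map (·.2.2))).1,
        (colstep mx.2.2 mn.2.2 px.2.2 (t.map (·.2.2))).2]

-- ===== VERDICT (by name: the statement is the Claim_ definition above) =====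
theorem is_blank_row_spec : Claim_equal_is_blank_row := by
  intro row_pixels tolerance _ hpre
  unfold Spec_is_blank_row is_blank_row is_blank_row_alt
  have hng : ¬ tolerance < 0 := not_lt.mpr hpre
  rw [if_neg hng, if_neg hng]
  cases row_pixels with
  | nil => rfl
  | cons first rest =>
    exact pvLoopA_eq tolerance rest first first le_rfl le_rfl le_rfl
      (by omega) (by omega) (by omega)
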